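-- pv_equiv track=rewrite | github.com/alanhassan/bullguer | dashboards.py | color_bars
-- ===== SOURCE A (Python) =====
-- def color_bars(values):
--     colors = []
--     for value in values:
--         if value == max(values):
--             colors.append('#53c654')  # Maior valor em verde
--         elif value == min(values):
--             colors.append('#940e0a')    # Menor valor em vermelho
--         else:
--             colors.append('#767bb2')   # Outros valores em azul
--     return colors
-- ===== SOURCE B (Python) =====
-- def color_bars(values):
--     if not values:
--         return []
--     mx = max(values)
--     mn = min(values)
--     colors = ['#767bb2'] * len(values)
--     for i, v in enumerate(values):
--         if v == mn:
--             colors[i] = '#940e0a'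
--     for i, v in enumerate(values):
--         if v == mx:
--             colors[i] = '#53c654'
--     return colors
-- ===== Notes on version B (the rewrite author's own statement) =====
-- stated objective: faster
-- what changed: B computes max and min once and paints a pre-filled blue list with two index-setting passes (min then max), instead of A's loop that recomputes max(values) and min(values) for every element.
import Mathlib
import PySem

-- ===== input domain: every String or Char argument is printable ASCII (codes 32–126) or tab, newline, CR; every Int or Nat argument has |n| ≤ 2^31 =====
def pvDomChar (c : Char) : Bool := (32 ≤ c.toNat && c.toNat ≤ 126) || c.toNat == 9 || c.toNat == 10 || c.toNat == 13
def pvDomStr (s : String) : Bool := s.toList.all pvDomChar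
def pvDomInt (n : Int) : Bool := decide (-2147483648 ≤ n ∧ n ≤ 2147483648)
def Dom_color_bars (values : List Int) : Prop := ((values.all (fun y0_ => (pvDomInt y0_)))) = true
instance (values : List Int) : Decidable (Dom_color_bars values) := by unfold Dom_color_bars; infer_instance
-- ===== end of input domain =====

-- B computes max/min once and paints a pre-filled blue list in two index-setting passes,
-- instead of A's loop recomputing max(values)/min(values) for each element (objective: faster).

-- ===== PORT A =====
def color_bars (values : List Int) : List String :=
  values.foldl (fun colors value =>
    if some value = PySem.List.max? values (fun y => y) then colors ++ ["#53c654"]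
    else if some value = PySem.List.min? values (fun y => y) then colors ++ ["#940e0a"]
    else colors ++ ["#767bb2"]) []

-- ===== PORT B =====
def color_bars_alt (values : List Int) : List String :=
  match values with
  | [] => []
  | _ :: _ =>
    let mx := PySem.List.max? values (fun y => y)
    let mn := PySem.List.min? values (fun y => y)
    let colors := PySem.List.pyRepeat ["#767bb2"] (values.length : Int)
    let colors := (PySem.List.enumerate values).foldl
      (fun c p => if some p.2 = mn then PySem.List.pySetD c p.1 "#940e0a" else c) colors
    (PySem.List.enumerate values).foldl
      (fun c p => if some p.2 = mx then PySem.List.pySetD c p.1 "#53c654" else c) colors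

-- ===== PRECONDITION & SPEC =====
def Spec_color_bars (values : List Int) (out : List String) : Prop := out = color_bars_alt values
instance (values : List Int) (out : List String) : Decidable (Spec_color_bars values out) := by unfold Spec_color_bars; infer_instance

-- ===== CLAIM =====
def Claim_equal_color_bars : Prop := ∀ (values : List Int), Dom_color_bars values → Spec_color_bars values (color_bars values)

-- ===== LEMMAS AND PROOFS =====

-- the color a single value receives, given the (constant) max and min of the whole list
def fColor (mx mn : Option Int) (x : Int) : String :=
  if some x = mx then "#53c654" else if some x = mn then "#940e0a" else "#767bb2"

lemma A_fold_map (mx mn : Option Int) (l : List Int) : ∀ (acc : List String),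
    l.foldl (fun colors value =>
      if some value = mx then colors ++ ["#53c654"]
      else if some value = mn then colors ++ ["#940e0a"]
      else colors ++ ["#767bb2"]) acc = acc ++ l.map (fColor mx mn) := by
  induction l with
  | nil => intro acc; simp
  | cons x t ih =>
    intro acc
    simp only [List.foldl_cons, List.map_cons, fColor]
    split_ifs <;> simp [ih]

lemma pass_shift (P : Int → Prop) [DecidablePred P] (v : String) (xs : List Int) :
    ∀ (s : Nat) (e : String) (c : List String),
    (PySem.List.enumerate xs ((s : Int) + 1)).foldl
      (fun c p => if P p.2 then PySem.List.pySetD c p.1 v else c) (e :: c)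
    = e :: (PySem.List.enumerate xs (s : Int)).foldl
      (fun c p => if P p.2 then PySem.List.pySetD c p.1 v else c) c := by
  induction xs with
  | nil => intro s e c; simp [PySem.List.enumerate_nil]
  | cons x t ih =>
    intro s e c
    simp only [PySem.List.enumerate_cons, List.foldl_cons]
    have hset : PySem.List.pySetD (e :: c) ((s : Int) + 1) v
        = e :: PySem.List.pySetD c (s : Int) v := by
      have h1 : ((s : Int) + 1) = ((s + 1 : Nat) : Int) := by push_cast; ring
      rw [h1, PySem.List.pySetD_natCast, PySem.List.pySetD_natCast]
      simp
    by_cases hp : P x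
    · simp only [if_pos hp, hset]
      have := ih (s + 1) e (PySem.List.pySetD c (s : Int) v)
      push_cast at this ⊢
      convert this using 3
    · simp only [if_neg hp]
      have := ih (s + 1) e c
      push_cast at this ⊢
      convert this using 3

lemma pass_map (P : Int → Prop) [DecidablePred P] (v : String) (g : Int → String) :
    ∀ (xs : List Int),
    (PySem.List.enumerate xs).foldl
      (fun c p => if P p.2 then PySem.List.pySetD c p.1 v else c) (xs.map g)
    = xs.map (fun x => if P x then v else g x) := by
  intro xs
  induction xs with
  | nil => simp [PySem.List.enumerate_nil]
  | cons x t ih =>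
    simp only [PySem.List.enumerate, List.map_cons, List.foldl_cons] at *
    have hhead : (if P x then PySem.List.pySetD (g x :: t.map g) (0 : Int) v else g x :: t.map g)
        = (if P x then v else g x) :: t.map g := by
      split_ifs with hp
      · rw [PySem.List.pySetD_of_nonneg _ _ le_rfl]; simp
      · rfl
    rw [hhead]
    have := pass_shift P v t 0 (if P x then v else g x) (t.map g)
    norm_num at this
    simp only [zero_add]
    rw [this, ih]

-- ===== VERDICT =====
theorem color_bars_spec : Claim_equal_color_bars := by
  intro values _
  unfold Spec_color_bars color_bars color_bars_alt
  cases values with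
  | nil => rfl
  | cons x t =>
    simp only
    rw [A_fold_map]
    have hrep : PySem.List.pyRepeat ["#767bb2"] ((x :: t).length : Int)
        = (x :: t).map (fun _ => "#767bb2") := by
      rw [PySem.List.pyRepeat_singleton]
      simp [List.replicate_succ]
    rw [hrep]
    rw [pass_map (fun z => some z = PySem.List.min? (x :: t) (fun y => y)) "#940e0a"
      (fun _ => "#767bb2") (x :: t)]
    rw [pass_map (fun z => some z = PySem.List.max? (x :: t) (fun y => y)) "#53c654"
      (fun z => if some z = PySem.List.min? (x :: t) (fun y => y) then "#940e0a" else "#767bb2")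
      (x :: t)]
    simp only [List.nil_append]
    rfl
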